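-- pv_equiv track=rewrite | github.com/hyperreality/Poetry-Tools | poetrytools/Poetry.py | stanza_lengths
-- ===== SOURCE A (Python) =====
-- def stanza_lengths(tokenized_poem):
--     """
--     Returns a comma-delimited string of stanza lengths
--     """
--
--     stanzas = []
--
--     i = 0
--     for line in tokenized_poem:
--         if line != ['']:
--             i += 1
--         else:
--             stanzas.append(str(i))
--             i = 0
--     if i != 0:
--         stanzas.append(str(i))
--
--     joined = ','.join(stanzas)
--     return joined
-- ===== SOURCE B (Python) =====
-- def stanza_lengths(tokenized_poem):
--     # group lines into stanzas at blank separators, then measure group sizes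
--     groups = [[]]
--     for line in tokenized_poem:
--         if line == ['']:
--             groups.append([])
--         else:
--             groups[-1].append(line)
--     lengths = [len(g) for g in groups]
--     if lengths and lengths[-1] == 0:
--         lengths.pop()
--     return ','.join(str(n) for n in lengths)
-- ===== Notes on version B (the rewrite author's own statement) =====
-- stated objective: alternative
-- what changed: B first splits the poem into explicit stanza groups at blank lines, then maps len over the groups and drops a trailing zero, instead of A's single counter loop that emits counts inline.
import Mathlib
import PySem

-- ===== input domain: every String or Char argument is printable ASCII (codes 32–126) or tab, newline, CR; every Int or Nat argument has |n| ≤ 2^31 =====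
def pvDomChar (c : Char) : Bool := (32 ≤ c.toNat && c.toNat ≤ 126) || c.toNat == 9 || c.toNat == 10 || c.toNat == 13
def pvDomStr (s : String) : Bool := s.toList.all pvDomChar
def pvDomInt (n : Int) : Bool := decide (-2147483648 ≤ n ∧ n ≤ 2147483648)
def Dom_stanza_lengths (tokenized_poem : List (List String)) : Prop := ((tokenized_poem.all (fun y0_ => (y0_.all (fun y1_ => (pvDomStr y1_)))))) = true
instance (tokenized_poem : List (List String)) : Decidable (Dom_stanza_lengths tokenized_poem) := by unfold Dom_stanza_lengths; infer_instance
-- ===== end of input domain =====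

-- B groups the lines into stanzas at blank separators and maps length over the groups (dropping a trailing zero), instead of A's inline counter loop; objective: alternative decomposition, same cost.

-- ===== PORT A =====
-- loop body of A: count non-blank lines, emit the count at each blank separator
def pvStepA (st : List String × Int) (line : List String) : List String × Int :=
  if line ≠ [""] then (st.1, st.2 + 1)
  else (st.1 ++ [PySem.Int.toStr st.2], 0)

def stanza_lengths (tokenized_poem : List (List String)) : String :=
  let s := tokenized_poem.foldl pvStepA ([], 0)
  let stanzas := if s.2 ≠ 0 then s.1 ++ [PySem.Int.toStr s.2] else s.1
  PySem.Str.join "," stanzas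

-- ===== PORT B =====
-- loop body of B: finished groups × current group; a blank line closes the current group
def pvStepB (st : List (List (List String)) × List (List String)) (line : List String) :
    List (List (List String)) × List (List String) :=
  if line = [""] then (st.1 ++ [st.2], [])
  else (st.1, st.2 ++ [line])

def stanza_lengths_alt (tokenized_poem : List (List String)) : String :=
  let g := tokenized_poem.foldl pvStepB ([], [])
  let groups := g.1 ++ [g.2]
  let lengths := groups.map (fun gr => (gr.length : Int))
  let lengths' := if lengths ≠ [] ∧ lengths.getLast? = some 0 then lengths.dropLast else lengths
  PySem.Str.join "," (lengths'.map PySem.Int.toStr)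

-- ===== PRECONDITION & SPEC =====
def Spec_stanza_lengths (tokenized_poem : List (List String)) (out : String) : Prop := out = stanza_lengths_alt tokenized_poem
instance (tokenized_poem : List (List String)) (out : String) : Decidable (Spec_stanza_lengths tokenized_poem out) := by unfold Spec_stanza_lengths; infer_instance

-- ===== CLAIM (what is proved, stated in full; the proofs are below) =====
def Claim_equal_stanza_lengths : Prop := ∀ (tokenized_poem : List (List String)), Dom_stanza_lengths tokenized_poem → Spec_stanza_lengths tokenized_poem (stanza_lengths tokenized_poem)

-- ===== LEMMAS AND PROOFS =====

def pvStrLen (g : List (List String)) : String := PySem.Int.toStr (g.length : Int)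

-- invariant: A's fold state is the image of B's fold state under (map strlen, length)
lemma pv_loop_inv (p : List (List String)) :
    ∀ (done : List (List (List String))) (cur : List (List String)),
    p.foldl pvStepA (done.map pvStrLen, (cur.length : Int))
      = ((p.foldl pvStepB (done, cur)).1.map pvStrLen,
         (((p.foldl pvStepB (done, cur)).2.length : Int)) ) := by
  induction p with
  | nil => intro done cur; rfl
  | cons l p ih =>
    intro done cur
    by_cases h : l = [""]
    · have hA : pvStepA (done.map pvStrLen, (cur.length : Int)) l
          = ((done ++ [cur]).map pvStrLen, ((([] : List (List String)).length : Int))) := by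
        simp [pvStepA, h, pvStrLen]
      have hB : pvStepB (done, cur) l = (done ++ [cur], []) := by simp [pvStepB, h]
      simp only [List.foldl_cons, hA, hB]
      exact ih (done ++ [cur]) []
    · have hA : pvStepA (done.map pvStrLen, (cur.length : Int)) l
          = (done.map pvStrLen, (((cur ++ [l]).length : Int))) := by
        simp [pvStepA, h]
      have hB : pvStepB (done, cur) l = (done, cur ++ [l]) := by simp [pvStepB, h]
      simp only [List.foldl_cons, hA, hB]
      exact ih done (cur ++ [l])

-- ===== VERDICT (by name: the statement is the Claim_ definition above) =====
theorem stanza_lengths_spec : Claim_equal_stanza_lengths := by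
  intro p _
  show stanza_lengths p = stanza_lengths_alt p
  unfold stanza_lengths stanza_lengths_alt
  have h := pv_loop_inv p [] []
  simp only [List.map_nil, List.length_nil, Int.natCast_zero] at h
  rw [h]
  set r := p.foldl pvStepB ([], []) with hr
  by_cases hz : r.2.length = 0
  · simp [hz, List.map_map]
    rfl
  · simp [hz, List.map_map]
    rfl
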